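-- pv_equiv track=rewrite | github.com/zhangsj0608/Dybatch | tree/TreeOps.py | generate_parent_list
-- ===== SOURCE A (Python) =====
-- def generate_parent_list(merged_tree_encoding):
--     """
--     生成pplist，对合成的树结构
--     :param merged_tree_encoding: 合成的树的叶节点编码，如['000'，'001'，'01'，'1']
--     :return: pplist, 父节点树
--     """
--     num_words = len(merged_tree_encoding)
--     total_len = num_words * 2 - 1
--     encoding_list = [merged_tree_encoding[i] if i < num_words else '-1' for i in range(total_len)]
--     pp_list = [-1] * total_len
--
--     available = [1 if i < num_words else 0 for i in range(total_len)]  # 1 available, 0 unavailable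
--
--     for total in range(num_words, total_len):
--         for i in range(total - 1, -1, -1):
--             if available[i] == 0:
--                 continue
--             encoding_l = encoding_list[i]
--             for j in range(i - 1, -1, -1):
--                 if available[j] == 0:
--                     continue
--                 encoding_r = encoding_list[j]
--                 if encoding_l[:-1] == encoding_r[:-1]:
--                     # l 与 r为兄弟节点
--                     pp_list[i] = total
--                     pp_list[j] = total
--                     available[i] = 0
--                     available[j] = 0
--
--                     encoding_list[total] = encoding_l[:-1]
--                     available[total] = 1
--                     break
--             if available[total] == 1:
--                 break
--     return pp_list
-- ===== SOURCE B (Python) =====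
-- def generate_parent_list(merged_tree_encoding):
--     """Group available nodes by sibling code (code minus last char) in a dict,
--     so each merge step picks the best pair directly instead of rescanning all
--     index pairs with string comparisons."""
--     num_words = len(merged_tree_encoding)
--     total_len = num_words * 2 - 1
--     pp_list = [-1] * max(total_len, 0)
--
--     groups = {}  # sibling prefix -> ascending list of available node indices
--     for idx, code in enumerate(merged_tree_encoding):
--         groups.setdefault(code[:-1], []).append(idx)
--
--     for total in range(num_words, total_len):
--         best = None  # (prefix, group) whose largest index is maximal
--         for prefix, g in groups.items():
--             if len(g) >= 2 and (best is None or g[-1] > best[1][-1]):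
--                 best = (prefix, g)
--         if best is None:
--             break  # no sibling pair exists now, so none ever will
--         prefix, g = best
--         i = g.pop()
--         j = g.pop()
--         pp_list[i] = total
--         pp_list[j] = total
--         groups.setdefault(prefix[:-1], []).append(total)
--     return pp_list
-- ===== Notes on version B (the rewrite author's own statement) =====
-- stated objective: faster
-- what changed: Instead of rescanning all index pairs with string comparisons at every merge step (three nested loops over the node array), B builds a dict grouping available node indices by their sibling code (code minus last char) once, so each merge step just picks the group with the largest maximal index and pops its two largest members, and stops as soon as no sibling pair is left.
import Mathlib
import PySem

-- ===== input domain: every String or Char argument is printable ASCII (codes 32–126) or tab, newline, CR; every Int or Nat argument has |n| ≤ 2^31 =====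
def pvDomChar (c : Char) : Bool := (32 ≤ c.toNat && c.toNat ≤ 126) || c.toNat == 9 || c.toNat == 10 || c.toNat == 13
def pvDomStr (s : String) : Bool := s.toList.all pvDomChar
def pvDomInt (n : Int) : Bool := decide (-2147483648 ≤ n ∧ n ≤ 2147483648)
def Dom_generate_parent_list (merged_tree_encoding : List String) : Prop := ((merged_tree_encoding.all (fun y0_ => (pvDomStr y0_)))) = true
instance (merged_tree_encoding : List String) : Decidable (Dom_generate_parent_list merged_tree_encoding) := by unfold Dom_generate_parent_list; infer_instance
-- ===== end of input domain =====

-- B replaces A's cubic rescans of all index pairs by a dict that groups the available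
-- nodes by sibling code (code minus last char), picking each merge pair directly.

-- s[:-1]
def pvPfx (s : String) : String := PySem.Str.slice s none (some (-1))

-- ===== PORT A =====

-- the inner 'for j in range(i - 1, -1, -1)' loop; on a sibling match it performs the
-- four assignments and breaks (returns), else falls through to the next j
def pvJloop (total i : Int) (encoding_l : String) (js : List Int)
    (enc : List String) (pp av : List Int) : List String × List Int × List Int :=
  match js with
  | [] => (enc, pp, av)
  | j :: rest =>
    if PySem.List.pyGetD av j 0 == 0 then pvJloop total i encoding_l rest enc pp av
    else
      let encoding_r := PySem.List.pyGetD enc j ""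
      if pvPfx encoding_l == pvPfx encoding_r then
        (PySem.List.pySetD enc total (pvPfx encoding_l),
         PySem.List.pySetD (PySem.List.pySetD pp i total) j total,
         PySem.List.pySetD (PySem.List.pySetD (PySem.List.pySetD av i 0) j 0) total 1)
      else pvJloop total i encoding_l rest enc pp av

-- the 'for i in range(total - 1, -1, -1)' loop with its trailing
-- 'if available[total] == 1: break'
def pvIloop (total : Int) (is : List Int)
    (enc : List String) (pp av : List Int) : List String × List Int × List Int :=
  match is with
  | [] => (enc, pp, av)
  | i :: rest =>
    if PySem.List.pyGetD av i 0 == 0 then pvIloop total rest enc pp av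
    else
      let encoding_l := PySem.List.pyGetD enc i ""
      let s := pvJloop total i encoding_l (PySem.List.pyRange (i - 1) (-1) (-1)) enc pp av
      if PySem.List.pyGetD s.2.2 total 0 == 1 then s
      else pvIloop total rest s.1 s.2.1 s.2.2

def generate_parent_list (merged_tree_encoding : List String) : List Int :=
  let num_words : Int := merged_tree_encoding.length
  let total_len : Int := num_words * 2 - 1
  let encoding_list : List String := (PySem.List.pyRange 0 total_len 1).map
      (fun i => if i < num_words then PySem.List.pyGetD merged_tree_encoding i "" else "-1")
  let pp_list : List Int := List.replicate total_len.toNat (-1)  -- [-1]*total_len ([] when total_len < 0)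
  let available : List Int := (PySem.List.pyRange 0 total_len 1).map
      (fun i => if i < num_words then (1 : Int) else 0)
  let fin := (PySem.List.pyRange num_words total_len 1).foldl
      (fun (st : List String × List Int × List Int) total =>
        pvIloop total (PySem.List.pyRange (total - 1) (-1) (-1)) st.1 st.2.1 st.2.2)
      (encoding_list, pp_list, available)
  fin.2.1

-- ===== PORT B =====

-- the 'for prefix, g in groups.items()' scan computing 'best'
def pvBest (groups : PySem.Dict String (List Int)) : Option (String × List Int) :=
  groups.items.foldl
    (fun best pg =>
      if 2 ≤ pg.2.length &&
          (match best with
           | none => true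
           | some b => PySem.List.pyGetD b.2 (-1) 0 < PySem.List.pyGetD pg.2 (-1) 0) then
        some pg
      else best)
    none

-- the 'for total in range(num_words, total_len)' loop; 'break' returns pp_list.
-- g.pop() twice: g has length ≥ 2 here, the popped values are g[-1] and then
-- (g.dropLast)[-1], and the list left in the dict is g.dropLast.dropLast.
def pvBloop (totals : List Int) (groups : PySem.Dict String (List Int))
    (pp : List Int) : List Int :=
  match totals with
  | [] => pp
  | total :: rest =>
    match pvBest groups with
    | none => pp
    | some (pfx0, g) =>
      let i := PySem.List.pyGetD g (-1) 0
      let j := PySem.List.pyGetD g.dropLast (-1) 0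
      let groups' := groups.insert pfx0 g.dropLast.dropLast
      let pp' := PySem.List.pySetD (PySem.List.pySetD pp i total) j total
      let k := pvPfx pfx0
      let groups'' := groups'.insert k (groups'.getD k [] ++ [total])  -- setdefault(k, []).append(total)
      pvBloop rest groups'' pp'

def generate_parent_list_alt (merged_tree_encoding : List String) : List Int :=
  let num_words : Int := merged_tree_encoding.length
  let total_len : Int := num_words * 2 - 1
  let pp_list : List Int := List.replicate (max total_len 0).toNat (-1)
  -- groups.setdefault(code[:-1], []).append(idx) over enumerate(merged_tree_encoding)
  let groups : PySem.Dict String (List Int) := (PySem.List.enumerate merged_tree_encoding 0).foldl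
      (fun d pc => d.insert (pvPfx pc.2) (d.getD (pvPfx pc.2) [] ++ [pc.1]))
      (PySem.Dict.mk [])
  pvBloop (PySem.List.pyRange num_words total_len 1) groups pp_list

-- ===== PRECONDITION & SPEC =====
def Spec_generate_parent_list (merged_tree_encoding : List String) (out : List Int) : Prop := out = generate_parent_list_alt merged_tree_encoding
instance (merged_tree_encoding : List String) (out : List Int) : Decidable (Spec_generate_parent_list merged_tree_encoding out) := by unfold Spec_generate_parent_list; infer_instance

-- ===== CLAIM (what is proved, stated in full; the proofs are below) =====
def Claim_equal_generate_parent_list : Prop := ∀ (merged_tree_encoding : List String), Dom_generate_parent_list merged_tree_encoding → Spec_generate_parent_list merged_tree_encoding (generate_parent_list merged_tree_encoding)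

-- ===== LEMMAS AND PROOFS =====

-- ---- generic helpers ----

theorem pvPyGetD_neg_one {α : Type} (g : List α) (d : α) (h : g ≠ []) :
    PySem.List.pyGetD g (-1) d = g.getLast h := by
  have hlen : 0 < g.length := List.length_pos_iff.mpr h
  have hidx : PySem.List.pyIdx? g.length (-1) = some (g.length - 1) := by
    unfold PySem.List.pyIdx?
    rw [if_neg (by omega), if_pos (by omega)]
    norm_num
  simp only [PySem.List.pyGetD, PySem.List.pyGet?, hidx]
  simp [List.getLast_eq_getElem, List.getElem?_eq_getElem (by omega : g.length - 1 < g.length)]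

theorem pvPyGetD_oob {α : Type} (xs : List α) (i : Int) (d : α) (h : (xs.length : Int) ≤ i) :
    PySem.List.pyGetD xs i d = d := by
  have hidx : PySem.List.pyIdx? xs.length i = none := by
    unfold PySem.List.pyIdx?
    rw [if_pos (by omega), if_neg (by omega)]
  simp [PySem.List.pyGetD, PySem.List.pyGet?, hidx]

theorem pvPyGetD_pySetD {α : Type} (xs : List α) (n m : Int) (v d : α)
    (h0 : 0 ≤ n) (h1 : n < (xs.length : Int)) (h2 : 0 ≤ m) :
    PySem.List.pyGetD (PySem.List.pySetD xs n v) m d = if m = n then v else PySem.List.pyGetD xs m d := by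
  have hn : n = ((n.toNat : Nat) : Int) := by omega
  have hm : m = ((m.toNat : Nat) : Int) := by omega
  rw [hn, hm, PySem.List.pyGetD_pySetD_natCast xs n.toNat m.toNat v d (by omega)]
  by_cases h : m.toNat = n.toNat
  · rw [if_pos h, if_pos (by omega)]
  · rw [if_neg h, if_neg (by omega)]

theorem pvFindEntry (l : List (String × List Int)) (p : String) (g : List Int)
    (hn : (l.map Prod.fst).Nodup) (h : (p, g) ∈ l) :
    l.find? (fun e => e.1 == p) = some (p, g) := by
  induction l with
  | nil => simp at h
  | cons e rest ih =>
    simp only [List.map_cons, List.nodup_cons] at hn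
    rcases List.mem_cons.mp h with he | ht
    · subst he; simp
    · have hne : ¬ (e.1 == p) = true := by
        intro hb
        exact hn.1 (by
          have : e.1 = p := by simpa using hb
          subst this
          exact List.mem_map.mpr ⟨(e.1, g), ht, rfl⟩)
      simp only [List.find?_cons, hne]
      exact ih hn.2 ht

theorem pvGetD_of_mem_items (d : PySem.Dict String (List Int)) (hn : d.keys.Nodup)
    {p : String} {g : List Int} (h : (p, g) ∈ d.items) : d.getD p [] = g := by
  have := pvFindEntry d.items p g hn h
  simp [PySem.Dict.getD, PySem.Dict.get?, this]

theorem pvMem_items_of_getD_ne_nil (d : PySem.Dict String (List Int)) (p : String)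
    (h : d.getD p [] ≠ []) : (p, d.getD p []) ∈ d.items := by
  simp only [PySem.Dict.getD, PySem.Dict.get?] at *
  cases hf : d.items.find? (fun e => e.1 == p) with
  | none => simp [hf] at h
  | some e =>
    have hmem := List.mem_of_find?_eq_some hf
    have hp : e.1 = p := by simpa using List.find?_some hf
    simp only [Option.map_some, Option.getD_some]
    rw [← hp]
    exact hmem

theorem pvNodupKeys_insert (d : PySem.Dict String (List Int)) (k : String) (v : List Int)
    (h : d.keys.Nodup) : (d.insert k v).keys.Nodup := by
  have := PySem.Dict.nodup_keys_foldl_insert_key [v] (fun _ => k) (fun _ x => x) d h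
  simpa using this

theorem pvPairwise_pyRange_neg_one (a b : Int) :
    (PySem.List.pyRange a b (-1)).Pairwise (· > ·) := by
  rw [PySem.List.pyRange_neg_one_eq_reverse]
  rw [List.pairwise_reverse]
  exact PySem.List.pairwise_lt_pyRange_one _ _

theorem pvFind?_desc_eq_some (l : List Int) (p : Int → Bool) (x : Int)
    (hs : l.Pairwise (· > ·)) (hx : x ∈ l) (hpx : p x = true)
    (hmax : ∀ y ∈ l, p y = true → y ≤ x) : l.find? p = some x := by
  induction l with
  | nil => simp at hx
  | cons a rest ih =>
    rw [List.pairwise_cons] at hs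
    rcases List.mem_cons.mp hx with rfl | hxr
    · simp only [List.find?_cons, hpx]
    · have hax : x < a := hs.1 x hxr
      have hpa : ¬ p a = true := by
        intro hpa
        exact absurd (hmax a List.mem_cons_self hpa) (by omega)
      simp only [List.find?_cons, hpa]
      exact ih hs.2 hxr (fun y hy hpy => hmax y (List.mem_cons_of_mem _ hy) hpy)


-- ---- loop characterizations ----

def pvKey (enc : List String) (k : Int) : String := pvPfx (PySem.List.pyGetD enc k "")

def pvPredJ (enc : List String) (av : List Int) (l : String) (j : Int) : Bool :=
  !(PySem.List.pyGetD av j 0 == 0) && (pvPfx l == pvPfx (PySem.List.pyGetD enc j ""))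

def pvPredI (enc : List String) (av : List Int) (i : Int) : Bool :=
  !(PySem.List.pyGetD av i 0 == 0) &&
    (PySem.List.pyRange (i - 1) (-1) (-1)).any (pvPredJ enc av (PySem.List.pyGetD enc i ""))

def pvUpd (enc : List String) (pp av : List Int) (total i j : Int) (l : String) :
    List String × List Int × List Int :=
  (PySem.List.pySetD enc total (pvPfx l),
   PySem.List.pySetD (PySem.List.pySetD pp i total) j total,
   PySem.List.pySetD (PySem.List.pySetD (PySem.List.pySetD av i 0) j 0) total 1)

theorem pvJloop_char (total i : Int) (l : String) (js : List Int)
    (enc : List String) (pp av : List Int) :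
    pvJloop total i l js enc pp av =
      match js.find? (pvPredJ enc av l) with
      | none => (enc, pp, av)
      | some j => pvUpd enc pp av total i j l := by
  induction js with
  | nil => simp [pvJloop]
  | cons j rest ih =>
    by_cases h1 : PySem.List.pyGetD av j 0 == 0
    · have hp : pvPredJ enc av l j = false := by simp [pvPredJ, h1]
      simp only [pvJloop, if_pos h1, List.find?_cons, hp, ih]
    · by_cases h2 : pvPfx l == pvPfx (PySem.List.pyGetD enc j "")
      · have hp : pvPredJ enc av l j = true := by simp [pvPredJ, h2]; simpa using h1
        simp only [pvJloop, if_neg h1, if_pos h2, List.find?_cons, hp, pvUpd]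
      · have hp : pvPredJ enc av l j = false := by simp [pvPredJ]; intro _; simpa using h2
        simp only [pvJloop, if_neg h1, if_neg h2, List.find?_cons, hp, ih]

theorem pvIloop_none (total : Int) (is : List Int) (enc : List String) (pp av : List Int)
    (hav : ¬ PySem.List.pyGetD av total 0 = 1)
    (hnone : is.find? (pvPredI enc av) = none) :
    pvIloop total is enc pp av = (enc, pp, av) := by
  induction is with
  | nil => simp [pvIloop]
  | cons i rest ih =>
    rw [List.find?_cons] at hnone
    cases hp : pvPredI enc av i with
    | true => rw [hp] at hnone; simp at hnone
    | false =>
      rw [hp] at hnone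
      simp only [pvIloop]
      by_cases h1 : PySem.List.pyGetD av i 0 == 0
      · rw [if_pos h1]; exact ih hnone
      · rw [if_neg h1]
        have hany : (PySem.List.pyRange (i - 1) (-1) (-1)).any
            (pvPredJ enc av (PySem.List.pyGetD enc i "")) = false := by
          by_contra hc
          have : pvPredI enc av i = true := by
            unfold pvPredI
            rw [Bool.and_eq_true]
            exact ⟨by simpa using h1, Bool.ne_false_iff.mp hc⟩
          rw [this] at hp; cases hp
        have hfind : (PySem.List.pyRange (i - 1) (-1) (-1)).find?
            (pvPredJ enc av (PySem.List.pyGetD enc i "")) = none := by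
          rw [List.find?_eq_none]
          intro x hx hpx
          have := List.any_eq_true.mpr ⟨x, hx, hpx⟩
          rw [this] at hany; cases hany
        rw [pvJloop_char, hfind]
        simp only []
        rw [if_neg (by simpa using hav)]
        exact ih hnone

theorem pvIloop_some (total : Int) (is : List Int) (enc : List String) (pp av : List Int)
    (i j : Int)
    (h0 : 0 ≤ total) (hlen : total < (av.length : Int))
    (hav : ¬ PySem.List.pyGetD av total 0 = 1)
    (hfi : is.find? (pvPredI enc av) = some i)
    (hfj : (PySem.List.pyRange (i - 1) (-1) (-1)).find?
        (pvPredJ enc av (PySem.List.pyGetD enc i "")) = some j) :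
    pvIloop total is enc pp av = pvUpd enc pp av total i j (PySem.List.pyGetD enc i "") := by
  induction is with
  | nil => simp at hfi
  | cons a rest ih =>
    rw [List.find?_cons] at hfi
    cases hp : pvPredI enc av a with
    | false =>
      rw [hp] at hfi
      simp only [pvIloop]
      by_cases h1 : PySem.List.pyGetD av a 0 == 0
      · rw [if_pos h1]; exact ih hfi
      · rw [if_neg h1]
        have hany : (PySem.List.pyRange (a - 1) (-1) (-1)).any
            (pvPredJ enc av (PySem.List.pyGetD enc a "")) = false := by
          by_contra hc
          have : pvPredI enc av a = true := by
            unfold pvPredI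
            rw [Bool.and_eq_true]
            exact ⟨by simpa using h1, Bool.ne_false_iff.mp hc⟩
          rw [this] at hp; cases hp
        have hfind : (PySem.List.pyRange (a - 1) (-1) (-1)).find?
            (pvPredJ enc av (PySem.List.pyGetD enc a "")) = none := by
          rw [List.find?_eq_none]
          intro x hx hpx
          have := List.any_eq_true.mpr ⟨x, hx, hpx⟩
          rw [this] at hany; cases hany
        rw [pvJloop_char, hfind]
        simp only []
        rw [if_neg (by simpa using hav)]
        exact ih hfi
    | true =>
      rw [hp] at hfi
      have hai : a = i := by simpa using hfi
      rw [← hai] at hfj ⊢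
      simp only [pvIloop]
      have h1 : ¬ PySem.List.pyGetD av a 0 == 0 := by
        simp only [pvPredI, Bool.and_eq_true] at hp
        simpa using hp.1
      rw [if_neg h1]
      rw [pvJloop_char, hfj]
      simp only [pvUpd]
      have : PySem.List.pyGetD
          (PySem.List.pySetD (PySem.List.pySetD (PySem.List.pySetD av a 0) j 0) total 1) total 0 = 1 := by
        rw [pvPyGetD_pySetD _ total total 1 0 h0 (by simpa using hlen) h0]
        simp
      rw [this]
      simp

-- ---- pvBest characterization ----

def pvBcond (best : Option (String × List Int)) (pg : String × List Int) : Bool :=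
  2 ≤ pg.2.length &&
    (match best with
     | none => true
     | some b => PySem.List.pyGetD b.2 (-1) 0 < PySem.List.pyGetD pg.2 (-1) 0)

def pvBstep (best : Option (String × List Int)) (pg : String × List Int) :
    Option (String × List Int) :=
  if 2 ≤ pg.2.length &&
      (match best with
       | none => true
       | some b => PySem.List.pyGetD b.2 (-1) 0 < PySem.List.pyGetD pg.2 (-1) 0) then
    some pg
  else best

theorem pvBstep_eq (b : Option (String × List Int)) (pg : String × List Int) :
    pvBstep b pg = if pvBcond b pg = true then some pg else b := rfl

theorem pvBest_eq_fold (groups : PySem.Dict String (List Int)) :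
    pvBest groups = groups.items.foldl pvBstep none := rfl

theorem pvBcond_none (pg : String × List Int) (h : 2 ≤ pg.2.length) :
    pvBcond none pg = true := by simp [pvBcond, h]

theorem pvBcond_true_len {b : Option (String × List Int)} {pg : String × List Int}
    (h : pvBcond b pg = true) : 2 ≤ pg.2.length := by
  simp only [pvBcond, Bool.and_eq_true] at h
  simpa using h.1

theorem pvBest_fold_none (l : List (String × List Int)) :
    ∀ (b : Option (String × List Int)), l.foldl pvBstep b = none ↔
      b = none ∧ ∀ pg ∈ l, ¬ 2 ≤ pg.2.length := by
  induction l with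
  | nil => simp
  | cons pg rest ih =>
    intro b
    simp only [List.foldl_cons, ih]
    constructor
    · rintro ⟨h1, h2⟩
      rw [pvBstep_eq] at h1
      by_cases hc : pvBcond b pg = true
      · rw [if_pos hc] at h1; cases h1
      · rw [if_neg hc] at h1
        subst h1
        refine ⟨rfl, fun qg hq => ?_⟩
        rcases List.mem_cons.mp hq with rfl | hq'
        · intro hlen
          exact hc (pvBcond_none qg hlen)
        · exact h2 qg hq'
    · rintro ⟨rfl, h2⟩
      have : pvBstep none pg = none := by
        rw [pvBstep_eq, if_neg]
        intro hc
        exact h2 pg List.mem_cons_self (pvBcond_true_len hc)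
      rw [this]
      exact ⟨rfl, fun qg hq => h2 qg (List.mem_cons_of_mem _ hq)⟩

theorem pvBest_fold_some (l : List (String × List Int)) :
    ∀ (b : Option (String × List Int)) (r : String × List Int),
      l.foldl pvBstep b = some r →
      (b = some r ∨ (r ∈ l ∧ 2 ≤ r.2.length)) ∧
      (∀ pg ∈ l, 2 ≤ pg.2.length → PySem.List.pyGetD pg.2 (-1) 0 ≤ PySem.List.pyGetD r.2 (-1) 0) ∧
      (∀ b', b = some b' → PySem.List.pyGetD b'.2 (-1) 0 ≤ PySem.List.pyGetD r.2 (-1) 0) := by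
  induction l with
  | nil =>
    intro b r h
    simp at h
    refine ⟨Or.inl (by rw [h]), by simp, ?_⟩
    intro b' hb'; rw [hb'] at h
    injection h with h
    rw [h]
  | cons pg rest ih =>
    intro b r h
    rw [List.foldl_cons] at h
    obtain ⟨h1, h2, h3⟩ := ih (pvBstep b pg) r h
    by_cases hc : pvBcond b pg = true
    · have hstep : pvBstep b pg = some pg := by rw [pvBstep_eq, if_pos hc]
      rw [hstep] at h1 h3
      have hpgr : PySem.List.pyGetD pg.2 (-1) 0 ≤ PySem.List.pyGetD r.2 (-1) 0 :=
        h3 pg rfl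
      refine ⟨?_, ?_, ?_⟩
      · rcases h1 with h1 | h1
        · injection h1 with h1
          exact Or.inr ⟨List.mem_cons.mpr (Or.inl h1.symm), h1 ▸ pvBcond_true_len hc⟩
        · exact Or.inr ⟨List.mem_cons_of_mem _ h1.1, h1.2⟩
      · intro qg hq hlq
        rcases List.mem_cons.mp hq with rfl | hq'
        · exact hpgr
        · exact h2 qg hq' hlq
      · intro b' hb'
        subst hb'
        simp only [pvBcond, Bool.and_eq_true] at hc
        exact le_trans (le_of_lt (by simpa using hc.2)) hpgr
    · have hstep : pvBstep b pg = b := by rw [pvBstep_eq, if_neg hc]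
      rw [hstep] at h1 h3
      refine ⟨?_, ?_, h3⟩
      · rcases h1 with h1 | h1
        · exact Or.inl h1
        · exact Or.inr ⟨List.mem_cons_of_mem _ h1.1, h1.2⟩
      · intro qg hq hlq
        rcases List.mem_cons.mp hq with rfl | hq'
        · cases b with
          | none => exact absurd (pvBcond_none qg hlq) hc
          | some bb =>
            by_cases hlt : PySem.List.pyGetD bb.2 (-1) 0 < PySem.List.pyGetD qg.2 (-1) 0
            · exact absurd (by simp [pvBcond, hlq, hlt]) hc
            · exact le_trans (by omega) (h3 bb rfl)
        · exact h2 qg hq' hlq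

-- ---- sorted-list helpers ----

theorem pvSorted_lt_last (l : List Int) (hs : l.Pairwise (· < ·)) (h : l ≠ []) :
    ∀ x ∈ l.dropLast, x < l.getLast h := by
  intro x hx
  have hdecomp : l.dropLast ++ [l.getLast h] = l := List.dropLast_append_getLast h
  rw [← hdecomp] at hs
  rw [List.pairwise_append] at hs
  exact hs.2.2 x hx (l.getLast h) (List.mem_singleton.mpr rfl)

theorem pvMem_last_or (l : List Int) (h : l ≠ []) (x : Int) (hx : x ∈ l) :
    x ∈ l.dropLast ∨ x = l.getLast h := by
  have hdecomp : l.dropLast ++ [l.getLast h] = l := List.dropLast_append_getLast h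
  rw [← hdecomp] at hx
  rcases List.mem_append.mp hx with h1 | h1
  · exact Or.inl h1
  · exact Or.inr (List.mem_singleton.mp h1)

theorem pvSorted_dropLast (l : List Int) (hs : l.Pairwise (· < ·)) :
    l.dropLast.Pairwise (· < ·) :=
  hs.sublist (List.dropLast_sublist l)

theorem pvSorted_le_last (l : List Int) (hs : l.Pairwise (· < ·)) (h : l ≠ []) :
    ∀ x ∈ l, x ≤ l.getLast h := by
  intro x hx
  rcases pvMem_last_or l h x hx with h1 | h1
  · exact le_of_lt (pvSorted_lt_last l hs h x h1)
  · exact le_of_eq h1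

theorem pvTwo_le_length {l : List Int} {x y : Int} (hx : x ∈ l) (hy : y ∈ l) (hne : x ≠ y) :
    2 ≤ l.length := by
  match l with
  | [] => simp at hx
  | [a] =>
    simp at hx hy
    exact absurd (hx.trans hy.symm) hne
  | a :: b :: rest => simp

-- ---- the coupling invariant ----

def pvAstep (st : List String × List Int × List Int) (total : Int) :
    List String × List Int × List Int :=
  pvIloop total (PySem.List.pyRange (total - 1) (-1) (-1)) st.1 st.2.1 st.2.2

def pvInv (t L : Int) (enc : List String) (pp av : List Int)
    (groups : PySem.Dict String (List Int)) : Prop :=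
  (enc.length : Int) = L ∧ (pp.length : Int) = L ∧ (av.length : Int) = L ∧
  (∀ k : Int, 0 ≤ k → PySem.List.pyGetD av k 0 = 0 ∨ PySem.List.pyGetD av k 0 = 1) ∧
  (∀ k : Int, 0 ≤ k → PySem.List.pyGetD av k 0 = 1 → k < t) ∧
  groups.keys.Nodup ∧
  (∀ p : String, ∀ k : Int, k ∈ groups.getD p [] →
      0 ≤ k ∧ PySem.List.pyGetD av k 0 = 1 ∧ pvKey enc k = p) ∧
  (∀ p : String, (groups.getD p []).Pairwise (· < ·)) ∧
  (∀ k : Int, 0 ≤ k → PySem.List.pyGetD av k 0 = 1 → k ∈ groups.getD (pvKey enc k) [])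

-- ---- no-pair case ----

theorem pvStep_none (t L : Int) (enc : List String) (pp av : List Int)
    (groups : PySem.Dict String (List Int))
    (hInv : pvInv t L enc pp av groups) (hb : pvBest groups = none) :
    ∀ i : Int, 0 ≤ i → pvPredI enc av i = false := by
  obtain ⟨-, -, -, hA4, -, -, -, -, hA7⟩ := hInv
  intro i h0i
  by_contra hc
  have hc : pvPredI enc av i = true := Bool.ne_false_iff.mp hc
  simp only [pvPredI, Bool.and_eq_true, List.any_eq_true] at hc
  obtain ⟨hi0, x, hxmem, hxp⟩ := hc
  have havi : PySem.List.pyGetD av i 0 = 1 := by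
    rcases hA4 i h0i with h | h
    · rw [h] at hi0; simp at hi0
    · exact h
  obtain ⟨hx1, hx2⟩ := PySem.List.mem_pyRange_neg_one.mp hxmem
  simp only [pvPredJ, Bool.and_eq_true] at hxp
  have havx : PySem.List.pyGetD av x 0 = 1 := by
    rcases hA4 x (by omega) with h | h
    · rw [h] at hxp; simp at hxp
    · exact h
  have hkeq : pvKey enc i = pvKey enc x := by
    have := hxp.2
    simpa [pvKey] using this
  have hi : i ∈ groups.getD (pvKey enc i) [] := hA7 i h0i havi
  have hx : x ∈ groups.getD (pvKey enc i) [] := hkeq ▸ hA7 x (by omega) havx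
  have hlen : 2 ≤ (groups.getD (pvKey enc i) []).length :=
    pvTwo_le_length hi hx (by omega)
  have hne : groups.getD (pvKey enc i) [] ≠ [] := by
    intro h; rw [h] at hlen; simp at hlen
  have hitems := pvMem_items_of_getD_ne_nil groups (pvKey enc i) hne
  rw [pvBest_eq_fold] at hb
  have := (pvBest_fold_none groups.items none).mp hb
  exact this.2 _ hitems hlen

theorem pvNoop_fold (t : Int) (enc : List String) (pp av : List Int)
    (h0t : 0 ≤ t)
    (hav : ∀ k : Int, 0 ≤ k → PySem.List.pyGetD av k 0 = 1 → k < t)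
    (hpred : ∀ i : Int, 0 ≤ i → pvPredI enc av i = false) :
    ∀ ts : List Int, (∀ x ∈ ts, t ≤ x) →
      ts.foldl pvAstep (enc, pp, av) = (enc, pp, av) := by
  intro ts
  induction ts with
  | nil => intro _; rfl
  | cons t' rest ih =>
    intro hts
    have ht' : t ≤ t' := hts t' List.mem_cons_self
    rw [List.foldl_cons]
    have hstep : pvAstep (enc, pp, av) t' = (enc, pp, av) := by
      unfold pvAstep
      apply pvIloop_none
      · intro h
        have := hav t' (by omega) h
        omega
      · rw [List.find?_eq_none]
        intro x hx
        obtain ⟨hx1, -⟩ := PySem.List.mem_pyRange_neg_one.mp hx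
        rw [hpred x (by omega)]
        simp
    rw [hstep]
    exact ih (fun x hx => hts x (List.mem_cons_of_mem _ hx))

-- ---- merge-step case ----

set_option maxHeartbeats 1000000 in
theorem pvStep_some (t L : Int) (enc : List String) (pp av : List Int)
    (groups : PySem.Dict String (List Int)) (p : String) (g : List Int)
    (hInv : pvInv t L enc pp av groups)
    (h0t : 0 ≤ t) (htL : t < L)
    (hb : pvBest groups = some (p, g)) :
    pvAstep (enc, pp, av) t =
      pvUpd enc pp av t (PySem.List.pyGetD g (-1) 0) (PySem.List.pyGetD g.dropLast (-1) 0)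
        (PySem.List.pyGetD enc (PySem.List.pyGetD g (-1) 0) "") ∧
    pvPfx (PySem.List.pyGetD enc (PySem.List.pyGetD g (-1) 0) "") = p ∧
    pvInv (t + 1) L
      (PySem.List.pySetD enc t (pvPfx (PySem.List.pyGetD enc (PySem.List.pyGetD g (-1) 0) "")))
      (PySem.List.pySetD (PySem.List.pySetD pp (PySem.List.pyGetD g (-1) 0) t)
        (PySem.List.pyGetD g.dropLast (-1) 0) t)
      (PySem.List.pySetD (PySem.List.pySetD
        (PySem.List.pySetD av (PySem.List.pyGetD g (-1) 0) 0)
        (PySem.List.pyGetD g.dropLast (-1) 0) 0) t 1)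
      ((groups.insert p g.dropLast.dropLast).insert (pvPfx p)
        ((groups.insert p g.dropLast.dropLast).getD (pvPfx p) [] ++ [t])) := by
  obtain ⟨hencL, hppL, havL, hA4, hA3, hND, hA5, hA6, hA7⟩ := hInv
  -- unpack pvBest
  rw [pvBest_eq_fold] at hb
  obtain ⟨hmem, hmax, -⟩ := pvBest_fold_some groups.items none (p, g) hb
  have hmem : (p, g) ∈ groups.items ∧ 2 ≤ g.length := by
    rcases hmem with h | h
    · cases h
    · exact h
  have hgetD : groups.getD p [] = g := pvGetD_of_mem_items groups hND hmem.1
  have hglen : 2 ≤ g.length := hmem.2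
  have hgne : g ≠ [] := by intro h; rw [h] at hglen; simp at hglen
  have hgdne : g.dropLast ≠ [] := by
    intro h
    have := congrArg List.length h
    simp at this
    omega
  have hgsort : g.Pairwise (· < ·) := hgetD ▸ hA6 p
  have hgdsort : g.dropLast.Pairwise (· < ·) := pvSorted_dropLast g hgsort
  -- i and j
  have hi_eq : PySem.List.pyGetD g (-1) 0 = g.getLast hgne := pvPyGetD_neg_one g 0 hgne
  have hj_eq : PySem.List.pyGetD g.dropLast (-1) 0 = g.dropLast.getLast hgdne :=
    pvPyGetD_neg_one g.dropLast 0 hgdne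
  set i := PySem.List.pyGetD g (-1) 0 with hi_def
  set j := PySem.List.pyGetD g.dropLast (-1) 0 with hj_def
  have hiMemG : i ∈ g := hi_eq ▸ List.getLast_mem hgne
  have hjMemGd : j ∈ g.dropLast := hj_eq ▸ List.getLast_mem hgdne
  have hjMemG : j ∈ g := List.dropLast_sublist g |>.mem hjMemGd
  have hji : j < i := hi_eq ▸ pvSorted_lt_last g hgsort hgne j hjMemGd
  obtain ⟨hi0, havi, hkeyi⟩ := hA5 p i (hgetD ▸ hiMemG)
  obtain ⟨hj0, havj, hkeyj⟩ := hA5 p j (hgetD ▸ hjMemG)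
  have hit : i < t := hA3 i hi0 havi
  set l := PySem.List.pyGetD enc i "" with hl_def
  have hpl : pvPfx l = p := hkeyi
  -- max of a group is at most i
  have hGrpMax : ∀ q : String, ∀ y : Int, y ∈ groups.getD q [] →
      2 ≤ (groups.getD q []).length → y ≤ i := by
    intro q y hy hql
    have hqne : groups.getD q [] ≠ [] := by
      intro h; rw [h] at hql; simp at hql
    have hqsort := hA6 q
    have hmaxq := hmax (q, groups.getD q []) (pvMem_items_of_getD_ne_nil groups q hqne) hql
    have hlast : PySem.List.pyGetD (groups.getD q []) (-1) 0 =
        (groups.getD q []).getLast hqne := pvPyGetD_neg_one _ 0 hqne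
    have hyle : y ≤ (groups.getD q []).getLast hqne :=
      pvSorted_le_last _ hqsort hqne y hy
    simp only at hmaxq
    rw [hlast] at hmaxq
    omega
  -- membership in g.dropLast.dropLast
  have hg2_iff : ∀ x : Int, x ∈ g.dropLast.dropLast ↔ (x ∈ g ∧ x ≠ i ∧ x ≠ j) := by
    intro x
    constructor
    · intro hx
      have hxgd : x ∈ g.dropLast := List.dropLast_sublist _ |>.mem hx
      have hxg : x ∈ g := List.dropLast_sublist _ |>.mem hxgd
      have hxj : x < j := hj_eq ▸ pvSorted_lt_last g.dropLast hgdsort hgdne x hx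
      exact ⟨hxg, by omega, by omega⟩
    · rintro ⟨hxg, hxi, hxj⟩
      rcases pvMem_last_or g hgne x hxg with h1 | h1
      · rcases pvMem_last_or g.dropLast hgdne x h1 with h2 | h2
        · exact h2
        · exact absurd (hj_eq ▸ h2.symm).symm hxj
      · exact absurd (hi_eq ▸ h1.symm).symm hxi
  -- the i-scan finds i
  have hpredJ_iff : ∀ x : Int, pvPredJ enc av l x = true ↔
      (¬ PySem.List.pyGetD av x 0 = 0) ∧ pvKey enc x = pvPfx l := by
    intro x
    simp only [pvPredJ, Bool.and_eq_true, pvKey]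
    constructor
    · rintro ⟨h1, h2⟩
      exact ⟨by simpa using h1, by simpa using (beq_iff_eq.mp h2).symm⟩
    · rintro ⟨h1, h2⟩
      exact ⟨by simpa using h1, beq_iff_eq.mpr h2.symm⟩
  have hpredJj : pvPredJ enc av l j = true := by
    rw [hpredJ_iff]
    exact ⟨by rw [havj]; omega, by rw [hkeyj, hpl]⟩
  have hpredIi : pvPredI enc av i = true := by
    simp only [pvPredI, Bool.and_eq_true]
    refine ⟨by rw [havi]; simp, List.any_eq_true.mpr ⟨j, ?_, hpredJj⟩⟩
    exact PySem.List.mem_pyRange_neg_one.mpr ⟨by omega, by omega⟩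
  have hfi : (PySem.List.pyRange (t - 1) (-1) (-1)).find? (pvPredI enc av) = some i := by
    apply pvFind?_desc_eq_some _ _ _ (pvPairwise_pyRange_neg_one _ _)
      (PySem.List.mem_pyRange_neg_one.mpr ⟨by omega, by omega⟩) hpredIi
    intro y hy hpy
    obtain ⟨hy1, hy2⟩ := PySem.List.mem_pyRange_neg_one.mp hy
    simp only [pvPredI, Bool.and_eq_true, List.any_eq_true] at hpy
    obtain ⟨hy3, x, hxmem, hxp⟩ := hpy
    have havy : PySem.List.pyGetD av y 0 = 1 := by
      rcases hA4 y (by omega) with h | h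
      · rw [h] at hy3; simp at hy3
      · exact h
    obtain ⟨hx1, hx2⟩ := PySem.List.mem_pyRange_neg_one.mp hxmem
    simp only [pvPredJ, Bool.and_eq_true] at hxp
    have havx : PySem.List.pyGetD av x 0 = 1 := by
      rcases hA4 x (by omega) with h | h
      · rw [h] at hxp; simp at hxp
      · exact h
    have hkeq : pvKey enc y = pvKey enc x := by
      have := hxp.2
      simpa [pvKey] using this
    have hyg : y ∈ groups.getD (pvKey enc y) [] := hA7 y (by omega) havy
    have hxg : x ∈ groups.getD (pvKey enc y) [] := hkeq ▸ hA7 x (by omega) havx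
    exact hGrpMax _ y hyg (pvTwo_le_length hyg hxg (by omega))
  have hfj : (PySem.List.pyRange (i - 1) (-1) (-1)).find? (pvPredJ enc av l) = some j := by
    apply pvFind?_desc_eq_some _ _ _ (pvPairwise_pyRange_neg_one _ _)
      (PySem.List.mem_pyRange_neg_one.mpr ⟨by omega, by omega⟩) hpredJj
    intro y hy hpy
    obtain ⟨hy1, hy2⟩ := PySem.List.mem_pyRange_neg_one.mp hy
    rw [hpredJ_iff] at hpy
    have havy : PySem.List.pyGetD av y 0 = 1 := by
      rcases hA4 y (by omega) with h | h
      · exact absurd h hpy.1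
      · exact h
    have hyg : y ∈ g := by
      rw [← hgetD, ← hpl, ← hpy.2]
      exact hA7 y (by omega) havy
    have hygd : y ∈ g.dropLast := by
      rcases pvMem_last_or g hgne y hyg with h1 | h1
      · exact h1
      · exact absurd (hi_eq ▸ h1.symm).symm (by omega)
    rw [hj_eq]
    exact pvSorted_le_last g.dropLast hgdsort hgdne y hygd
  have havt : ¬ PySem.List.pyGetD av t 0 = 1 := by
    intro h
    have := hA3 t h0t h
    omega
  have hstepA : pvAstep (enc, pp, av) t = pvUpd enc pp av t i j l := by
    unfold pvAstep
    exact pvIloop_some t _ enc pp av i j h0t (by omega) havt hfi hfj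
  refine ⟨by rw [hstepA], hpl, ?_⟩
  -- ---- re-establish the invariant at t+1 ----
  set enc' := PySem.List.pySetD enc t (pvPfx l) with henc'
  set pp' := PySem.List.pySetD (PySem.List.pySetD pp i t) j t with hpp'
  set av' := PySem.List.pySetD (PySem.List.pySetD (PySem.List.pySetD av i 0) j 0) t 1 with hav'
  set p2 := pvPfx p with hp2
  set g2 := g.dropLast.dropLast with hg2
  set groups' := groups.insert p g2 with hgroups'
  set groups'' := groups'.insert p2 (groups'.getD p2 [] ++ [t]) with hgroups''
  have havL' : ((PySem.List.pySetD (PySem.List.pySetD av i 0) j 0).length : Int) = L := by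
    simp [PySem.List.length_pySetD, havL]
  have havget : ∀ k : Int, 0 ≤ k →
      PySem.List.pyGetD av' k 0 =
        if k = t then 1 else if k = j then 0 else if k = i then 0
        else PySem.List.pyGetD av k 0 := by
    intro k h0k
    rw [hav']
    rw [pvPyGetD_pySetD _ t k 1 0 h0t (by rw [havL']; omega) h0k]
    by_cases hkt : k = t
    · rw [if_pos hkt, if_pos hkt]
    · rw [if_neg hkt, if_neg hkt]
      rw [pvPyGetD_pySetD _ j k 0 0 hj0 (by simp [PySem.List.length_pySetD]; omega) h0k]
      by_cases hkj : k = j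
      · rw [if_pos hkj, if_pos hkj]
      · rw [if_neg hkj, if_neg hkj]
        rw [pvPyGetD_pySetD _ i k 0 0 hi0 (by omega) h0k]
  have hencget : ∀ k : Int, 0 ≤ k →
      PySem.List.pyGetD enc' k "" =
        if k = t then pvPfx l else PySem.List.pyGetD enc k "" := by
    intro k h0k
    rw [henc']
    rw [pvPyGetD_pySetD _ t k (pvPfx l) "" h0t (by rw [hencL]; omega) h0k]
  have hkey' : ∀ k : Int, 0 ≤ k → k ≠ t → pvKey enc' k = pvKey enc k := by
    intro k h0k hkt
    simp only [pvKey]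
    rw [hencget k h0k, if_neg hkt]
  have hkey't : pvKey enc' t = p2 := by
    simp only [pvKey]
    rw [hencget t h0t, if_pos rfl, hpl, hp2]
  have hG' : ∀ q : String, groups'.getD q [] =
      if q = p then g2 else groups.getD q [] := by
    intro q
    rw [hgroups', PySem.Dict.getD_insert]
  have hG'' : ∀ q : String, groups''.getD q [] =
      if q = p2 then groups'.getD p2 [] ++ [t] else groups'.getD q [] := by
    intro q
    rw [hgroups'', PySem.Dict.getD_insert]
  -- old members that survive
  have hsurv : ∀ q : String, ∀ k : Int, k ∈ groups.getD q [] → k ≠ i → k ≠ j →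
      (0 ≤ k ∧ PySem.List.pyGetD av' k 0 = 1 ∧ pvKey enc' k = q ∧ k < t) := by
    intro q k hk hki hkj
    obtain ⟨h0k, havk, hkeyk⟩ := hA5 q k hk
    have hkt : k < t := hA3 k h0k havk
    refine ⟨h0k, ?_, ?_, hkt⟩
    · rw [havget k h0k, if_neg (by omega), if_neg hkj, if_neg hki]
      exact havk
    · rw [hkey' k h0k (by omega)]
      exact hkeyk
  -- membership in the new groups, described once and for all
  have hmem'' : ∀ q : String, ∀ k : Int, k ∈ groups''.getD q [] ↔
      ((q = p2 ∧ k = t) ∨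
       (q = p ∧ k ∈ g2) ∨
       (q ≠ p ∧ k ∈ groups.getD q [])) := by
    intro q k
    rw [hG'' q]
    by_cases hq2 : q = p2
    · rw [if_pos hq2, List.mem_append, hG' p2]
      by_cases hqp : p2 = p
      · rw [if_pos hqp]
        constructor
        · rintro (h | h)
          · exact Or.inr (Or.inl ⟨hq2.trans hqp, h⟩)
          · exact Or.inl ⟨hq2, by simpa using h⟩
        · rintro (⟨-, h⟩ | ⟨-, h⟩ | ⟨hne, -⟩)
          · exact Or.inr (by simp [h])
          · exact Or.inl h
          · exact absurd (hq2.trans hqp) hne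
      · rw [if_neg hqp]
        constructor
        · rintro (h | h)
          · exact Or.inr (Or.inr ⟨fun hqp' => hqp ((hq2.symm.trans hqp')), hq2 ▸ h⟩)
          · exact Or.inl ⟨hq2, by simpa using h⟩
        · rintro (⟨-, h⟩ | ⟨hqp', -⟩ | ⟨-, h⟩)
          · exact Or.inr (by simp [h])
          · exact absurd (hq2.symm.trans hqp') hqp
          · exact Or.inl (hq2 ▸ h)
    · rw [if_neg hq2, hG' q]
      by_cases hqp : q = p
      · rw [if_pos hqp]
        constructor
        · intro h; exact Or.inr (Or.inl ⟨hqp, h⟩)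
        · rintro (⟨hq2', -⟩ | ⟨-, h⟩ | ⟨hne, -⟩)
          · exact absurd hq2' hq2
          · exact h
          · exact absurd hqp hne
      · rw [if_neg hqp]
        constructor
        · intro h; exact Or.inr (Or.inr ⟨hqp, h⟩)
        · rintro (⟨hq2', -⟩ | ⟨hqp', -⟩ | ⟨-, h⟩)
          · exact absurd hq2' hq2
          · exact absurd hqp' hqp
          · exact h
  refine ⟨by rw [henc']; simpa [PySem.List.length_pySetD] using hencL,
          by rw [hpp']; simpa [PySem.List.length_pySetD] using hppL,
          by rw [hav']; simpa [PySem.List.length_pySetD] using havL, ?_, ?_, ?_, ?_, ?_, ?_⟩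
  · -- A4
    intro k h0k
    rw [havget k h0k]
    by_cases h1 : k = t
    · simp [h1]
    · rw [if_neg h1]
      by_cases h2 : k = j
      · simp [h2]
      · rw [if_neg h2]
        by_cases h3 : k = i
        · simp [h3]
        · rw [if_neg h3]; exact hA4 k h0k
  · -- A3
    intro k h0k hk1
    rw [havget k h0k] at hk1
    by_cases h1 : k = t
    · omega
    · rw [if_neg h1] at hk1
      by_cases h2 : k = j
      · rw [if_pos h2] at hk1; cases hk1
      · rw [if_neg h2] at hk1
        by_cases h3 : k = i
        · rw [if_pos h3] at hk1; cases hk1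
        · rw [if_neg h3] at hk1
          have := hA3 k h0k hk1
          omega
  · -- keys Nodup
    exact pvNodupKeys_insert _ _ _ (pvNodupKeys_insert _ _ _ hND)
  · -- A5
    intro q k hk
    rcases (hmem'' q k).mp hk with ⟨hq, hk1⟩ | ⟨hq, hk2⟩ | ⟨hqp, hk2⟩
    · rw [hk1, hq]
      refine ⟨h0t, ?_, hkey't⟩
      rw [havget t h0t, if_pos rfl]
    · obtain ⟨hkg, hki, hkj⟩ := (hg2_iff k).mp hk2
      obtain ⟨h1, h2, h3, h4⟩ := hsurv p k (by rw [hgetD]; exact hkg) hki hkj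
      exact ⟨h1, h2, by rw [hq]; exact h3⟩
    · have hki : k ≠ i := by
        intro h
        obtain ⟨-, -, hkeyk⟩ := hA5 q k hk2
        rw [h] at hkeyk
        exact hqp (hkeyk.symm.trans hkeyi)
      have hkj : k ≠ j := by
        intro h
        obtain ⟨-, -, hkeyk⟩ := hA5 q k hk2
        rw [h] at hkeyk
        exact hqp (hkeyk.symm.trans hkeyj)
      obtain ⟨h1, h2, h3, h4⟩ := hsurv q k hk2 hki hkj
      exact ⟨h1, h2, h3⟩
  · -- A6 sortedness
    intro q
    rw [hG'' q]
    by_cases hq2 : q = p2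
    · rw [if_pos hq2]
      rw [List.pairwise_append]
      refine ⟨?_, by simp, ?_⟩
      · rw [hG']
        by_cases hqp : p2 = p
        · rw [if_pos hqp]
          exact pvSorted_dropLast _ hgdsort
        · rw [if_neg hqp]
          exact hA6 p2
      · intro x hx y hy
        rw [List.mem_singleton] at hy
        subst hy
        rw [hG'] at hx
        by_cases hqp : p2 = p
        · rw [if_pos hqp] at hx
          obtain ⟨hxg, -, -⟩ := (hg2_iff x).mp hx
          obtain ⟨h0x, havx, -⟩ := hA5 p x (by rw [hgetD]; exact hxg)
          exact hA3 x h0x havx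
        · rw [if_neg hqp] at hx
          obtain ⟨h0x, havx, -⟩ := hA5 p2 x hx
          exact hA3 x h0x havx
    · rw [if_neg hq2, hG']
      by_cases hqp : q = p
      · rw [if_pos hqp]
        exact pvSorted_dropLast _ hgdsort
      · rw [if_neg hqp]
        exact hA6 q
  · -- A7
    intro k h0k hk1
    rw [havget k h0k] at hk1
    by_cases h1 : k = t
    · subst h1
      rw [hkey't]
      rw [(hmem'' p2 k)]
      exact Or.inl ⟨rfl, rfl⟩
    · rw [if_neg h1] at hk1
      by_cases h2 : k = j
      · rw [if_pos h2] at hk1; cases hk1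
      · rw [if_neg h2] at hk1
        by_cases h3 : k = i
        · rw [if_pos h3] at hk1; cases hk1
        · rw [if_neg h3] at hk1
          have hkold := hA7 k h0k hk1
          rw [hkey' k h0k h1]
          rw [hmem'']
          by_cases hqp : pvKey enc k = p
          · refine Or.inr (Or.inl ⟨hqp, ?_⟩)
            rw [hg2_iff]
            refine ⟨?_, h3, h2⟩
            rw [← hgetD, ← hqp]
            exact hkold
          · exact Or.inr (Or.inr ⟨hqp, hkold⟩)

-- ---- main loop induction ----

theorem pvMain_loop (c : Nat) :
    ∀ (t L : Int) (enc : List String) (pp av : List Int)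
      (groups : PySem.Dict String (List Int)),
      0 ≤ t → c = (L - t).toNat → pvInv t L enc pp av groups →
      ((PySem.List.pyRange t L 1).foldl pvAstep (enc, pp, av)).2.1 =
        pvBloop (PySem.List.pyRange t L 1) groups pp := by
  induction c with
  | zero =>
    intro t L enc pp av groups h0t hc hInv
    rw [PySem.List.pyRange_one_eq_nil (by omega)]
    rfl
  | succ c ih =>
    intro t L enc pp av groups h0t hc hInv
    have htL : t < L := by omega
    rw [PySem.List.pyRange_one_cons htL, List.foldl_cons]
    cases hb : pvBest groups with
    | none =>
      have hnp := pvStep_none t L enc pp av groups hInv hb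
      obtain ⟨-, -, -, -, hA3, -, -, -, -⟩ := hInv
      have hstep : pvAstep (enc, pp, av) t = (enc, pp, av) := by
        unfold pvAstep
        apply pvIloop_none
        · intro h; exact absurd (hA3 t h0t h) (by omega)
        · rw [List.find?_eq_none]
          intro x hx
          obtain ⟨hx1, -⟩ := PySem.List.mem_pyRange_neg_one.mp hx
          rw [hnp x (by omega)]
          simp
      rw [hstep]
      have hnoop := pvNoop_fold t enc pp av h0t hA3 hnp (PySem.List.pyRange (t + 1) L 1)
          (fun x hx => by
            obtain ⟨h1, h2⟩ := PySem.List.mem_pyRange_one.mp hx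
            omega)
      rw [hnoop]
      simp [pvBloop, hb]
    | some pg =>
      obtain ⟨p, g⟩ := pg
      obtain ⟨hstepA, hpl, hInv'⟩ := pvStep_some t L enc pp av groups p g hInv h0t htL hb
      rw [hstepA]
      have hBstep : pvBloop (t :: PySem.List.pyRange (t + 1) L 1) groups pp =
          pvBloop (PySem.List.pyRange (t + 1) L 1)
            ((groups.insert p g.dropLast.dropLast).insert (pvPfx p)
              ((groups.insert p g.dropLast.dropLast).getD (pvPfx p) [] ++ [t]))
            (PySem.List.pySetD (PySem.List.pySetD pp (PySem.List.pyGetD g (-1) 0) t)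
              (PySem.List.pyGetD g.dropLast (-1) 0) t) := by
        simp only [pvBloop, hb]
      rw [hBstep]
      simp only [pvUpd]
      exact ih (t + 1) L _ _ _ _ (by omega) (by omega) hInv'

-- ---- initial state ----

theorem pvInv_init (merged : List String) (hn : 1 ≤ merged.length) :
    pvInv (merged.length : Int) ((merged.length : Int) * 2 - 1)
      ((PySem.List.pyRange 0 ((merged.length : Int) * 2 - 1) 1).map
        (fun i => if i < (merged.length : Int) then PySem.List.pyGetD merged i "" else "-1"))
      (List.replicate ((merged.length : Int) * 2 - 1).toNat (-1))
      ((PySem.List.pyRange 0 ((merged.length : Int) * 2 - 1) 1).map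
        (fun i => if i < (merged.length : Int) then (1 : Int) else 0))
      ((PySem.List.enumerate merged 0).foldl
        (fun d pc => d.insert (pvPfx pc.2) (d.getD (pvPfx pc.2) [] ++ [pc.1]))
        (PySem.Dict.mk [])) := by
  set nI : Int := (merged.length : Int) with hnI
  set L : Int := nI * 2 - 1 with hL
  have hL1 : 1 ≤ L := by omega
  set encI := (PySem.List.pyRange 0 L 1).map
      (fun i => if i < nI then PySem.List.pyGetD merged i "" else "-1") with hencI
  set avI := (PySem.List.pyRange 0 L 1).map
      (fun i => if i < nI then (1 : Int) else 0) with havI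
  set G := (PySem.List.enumerate merged 0).foldl
      (fun d pc => d.insert (pvPfx pc.2) (d.getD (pvPfx pc.2) [] ++ [pc.1]))
      (PySem.Dict.mk []) with hG
  have hlenenc : (encI.length : Int) = L := by
    rw [hencI]
    simp [PySem.List.length_pyRange_one]
    omega
  have hlenav : (avI.length : Int) = L := by
    rw [havI]
    simp [PySem.List.length_pyRange_one]
    omega
  have havget0 : ∀ k : Int, 0 ≤ k →
      PySem.List.pyGetD avI k 0 = if k < nI then 1 else 0 := by
    intro k h0k
    by_cases hkL : k < L
    · rw [havI, PySem.List.pyGetD_map_pyRange_of_nonneg _ _ _ _ h0k hkL]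
    · rw [pvPyGetD_oob _ _ _ (by omega), if_neg (by omega)]
  have hencget0 : ∀ k : Int, 0 ≤ k → k < nI →
      PySem.List.pyGetD encI k "" = PySem.List.pyGetD merged k "" := by
    intro k h0k hkn
    rw [hencI, PySem.List.pyGetD_map_pyRange_of_nonneg _ _ _ _ h0k (by omega), if_pos hkn]
  have hbuild : G = ((PySem.List.enumerate merged 0).map
        (fun pc => (pvPfx pc.2, pc.1))).foldl
      (fun d pr => d.modify pr.1 [] (· ++ [pr.2])) (PySem.Dict.mk []) := by
    rw [List.foldl_map]
    rfl
  have hGget : ∀ p : String, G.getD p [] =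
      ((PySem.List.enumerate merged 0).filter
        (fun pc => pvPfx pc.2 == p)).map (·.1) := by
    intro p
    rw [hbuild, PySem.Dict.getD_foldl_modify_append]
    have hd : (PySem.Dict.mk ([] : List (String × List Int))).getD p [] = [] := rfl
    rw [hd]
    rw [List.filter_map, List.map_map]
    rfl
  have hmemG : ∀ p : String, ∀ k : Int, k ∈ G.getD p [] ↔
      (0 ≤ k ∧ k < nI ∧ pvPfx (PySem.List.pyGetD merged k "") = p) := by
    intro p k
    rw [hGget p]
    simp only [List.mem_map, List.mem_filter]
    constructor
    · rintro ⟨pc, ⟨hpc, hfc⟩, rfl⟩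
      obtain ⟨c, hc, rfl⟩ := (PySem.List.mem_enumerate_iff merged 0 pc).mp hpc
      refine ⟨by simp, by simp; omega, ?_⟩
      have : PySem.List.pyGetD merged ((0 : Int) + c) "" = merged[c] := by
        rw [PySem.List.pyGetD_eq_getElem merged "" (by omega) (by simp; omega)]
        congr 1
        omega
      rw [this]
      simpa using hfc
    · rintro ⟨h0k, hkn, hkey⟩
      refine ⟨((0 : Int) + k.toNat, merged[k.toNat]'(by omega)), ⟨?_, ?_⟩, by simp; omega⟩
      · rw [PySem.List.mem_enumerate_iff]
        exact ⟨k.toNat, by omega, rfl⟩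
      · simp only [beq_iff_eq]
        have : PySem.List.pyGetD merged k "" = merged[k.toNat]'(by omega) := by
          rw [PySem.List.pyGetD_eq_getElem merged "" h0k (by omega)]
        rw [← this]
        exact hkey
  refine ⟨hlenenc, by simp; omega, hlenav, ?_, ?_, ?_, ?_, ?_, ?_⟩
  · intro k h0k
    rw [havget0 k h0k]
    by_cases h : k < nI
    · rw [if_pos h]; exact Or.inr rfl
    · rw [if_neg h]; exact Or.inl rfl
  · intro k h0k h1
    rw [havget0 k h0k] at h1
    by_cases h : k < nI
    · exact h
    · rw [if_neg h] at h1; cases h1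
  · rw [hbuild]
    have : ∀ (l : List (String × Int)) (d : PySem.Dict String (List Int)),
        d.keys.Nodup →
        (l.foldl (fun d pr => d.modify pr.1 [] (· ++ [pr.2])) d).keys.Nodup := by
      intro l
      induction l with
      | nil => intro d hd; exact hd
      | cons pr rest ih =>
        intro d hd
        rw [List.foldl_cons]
        exact ih _ (pvNodupKeys_insert _ _ _ hd)
    exact this _ _ (by simp [PySem.Dict.keys])
  · intro p k hk
    obtain ⟨h0k, hkn, hkey⟩ := (hmemG p k).mp hk
    refine ⟨h0k, by rw [havget0 k h0k, if_pos hkn], ?_⟩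
    simp only [pvKey]
    rw [hencget0 k h0k hkn]
    exact hkey
  · intro p
    rw [hGget p]
    have hpw := PySem.List.pairwise_lt_enumerate merged 0
    have := List.Pairwise.filter (R := fun p q : Int × String => p.1 < q.1)
      (fun pc => pvPfx pc.2 == p) hpw
    exact List.pairwise_map.mpr this
  · intro k h0k h1
    rw [havget0 k h0k] at h1
    by_cases h : k < nI
    · rw [hmemG]
      refine ⟨h0k, h, ?_⟩
      simp only [pvKey]
      rw [hencget0 k h0k h]
    · rw [if_neg h] at h1; cases h1

-- ---- top level ----

theorem pvFinal (merged : List String) :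
    generate_parent_list merged = generate_parent_list_alt merged := by
  by_cases hn : 1 ≤ merged.length
  case neg =>
    have h0 : merged = [] := by
      cases merged with
      | nil => rfl
      | cons a l => simp at hn
    subst h0
    rfl
  case pos =>
    have hA : generate_parent_list merged =
        ((PySem.List.pyRange (merged.length : Int) ((merged.length : Int) * 2 - 1) 1).foldl
          pvAstep
          ((PySem.List.pyRange 0 ((merged.length : Int) * 2 - 1) 1).map
            (fun i => if i < (merged.length : Int) then PySem.List.pyGetD merged i "" else "-1"),
           List.replicate ((merged.length : Int) * 2 - 1).toNat (-1),
           (PySem.List.pyRange 0 ((merged.length : Int) * 2 - 1) 1).map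
            (fun i => if i < (merged.length : Int) then (1 : Int) else 0))).2.1 := rfl
    have hB : generate_parent_list_alt merged =
        pvBloop (PySem.List.pyRange (merged.length : Int) ((merged.length : Int) * 2 - 1) 1)
          ((PySem.List.enumerate merged 0).foldl
            (fun d pc => d.insert (pvPfx pc.2) (d.getD (pvPfx pc.2) [] ++ [pc.1]))
            (PySem.Dict.mk []))
          (List.replicate (max ((merged.length : Int) * 2 - 1) 0).toNat (-1)) := rfl
    have htn : (max ((merged.length : Int) * 2 - 1) 0).toNat =
        ((merged.length : Int) * 2 - 1).toNat := by omega
    rw [htn] at hB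
    rw [hA, hB]
    exact pvMain_loop (((merged.length : Int) * 2 - 1) - (merged.length : Int)).toNat
      (merged.length : Int) ((merged.length : Int) * 2 - 1) _ _ _ _
      (by omega) rfl (pvInv_init merged hn)

-- ===== VERDICT (by name: the statement is the Claim_ definition above) =====
theorem generate_parent_list_spec : Claim_equal_generate_parent_list := by
  unfold Claim_equal_generate_parent_list
  intro merged _
  unfold Spec_generate_parent_list
  exact pvFinal merged
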